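-- pv_equiv track=rewrite | github.com/jelena3214/Py | dz4.1.py | withoutFirstandLast
-- ===== SOURCE A (Python) =====
-- punctation = [".", ",", "!", "?", ":", ";"]
--
-- def recursion(element):
--     if element[0].lower() == element[-1].lower() and len(element) > 2:
--         temp = element[1:-1]
--         return recursion(temp)
--     return element
--
-- def withoutFirstandLast(elements):
--     final = []
--     for i in range(len(elements)):
--         if elements[i] not in punctation:
--             if len(elements[i]) >= 3:
--                 temp1 = recursion(elements[i])
--                 final.append(temp1)
--             else:
--                 final.append(elements[i])
--         else:
--             final.append(elements[i])
--     return final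
-- ===== SOURCE B (Python) =====
-- punctation = [".", ",", "!", "?", ":", ";"]
--
-- def withoutFirstandLast(elements):
--     def strip_outer(s):
--         i, j = 0, len(s) - 1
--         while j - i >= 2 and s[i].lower() == s[j].lower():
--             i += 1
--             j -= 1
--         return s[i:j + 1]
--     return [s if s in punctation or len(s) < 3 else strip_outer(s) for s in elements]
-- ===== Notes on version B (the rewrite author's own statement) =====
-- stated objective: alternative
-- what changed: Replaces the recursive helper that re-slices the string once per stripped pair with a two-pointer index scan that moves inward while the outer characters match case-insensitively and takes a single slice at the end; the outer index loop becomes a list comprehension.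
import Mathlib
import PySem

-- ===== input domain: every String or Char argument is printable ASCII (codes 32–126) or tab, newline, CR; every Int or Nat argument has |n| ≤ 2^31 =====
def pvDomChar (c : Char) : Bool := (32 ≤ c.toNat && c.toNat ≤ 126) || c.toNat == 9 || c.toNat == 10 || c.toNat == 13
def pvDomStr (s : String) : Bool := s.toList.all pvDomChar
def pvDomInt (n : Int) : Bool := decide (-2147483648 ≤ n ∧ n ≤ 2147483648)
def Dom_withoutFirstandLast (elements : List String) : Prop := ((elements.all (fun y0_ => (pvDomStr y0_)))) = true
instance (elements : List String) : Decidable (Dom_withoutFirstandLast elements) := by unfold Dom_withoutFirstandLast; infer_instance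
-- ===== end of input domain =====

-- B replaces A's recursive re-slicing (a fresh string copy per stripped pair) by a
-- two-pointer index scan with a single final slice per word; return values agree everywhere.

-- ===== PORT A =====
def punctation : List String := [".", ",", "!", "?", ":", ";"]

-- recursion(element), ported on the string's character list (PySem string ops are defined on List Char)
def recursionA (cs : List Char) : List Char :=
  if ((PySem.List.pyGet? cs 0).map PySem.Chars.lowerChar =
        (PySem.List.pyGet? cs (-1)).map PySem.Chars.lowerChar) ∧ 2 < cs.length then
    recursionA (PySem.List.slice cs (some 1) (some (-1)))
  else cs
termination_by cs.length
decreasing_by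
  rename_i h
  simp only [PySem.List.length_slice, PySem.List.clampIdx_neg_one]
  omega

def withoutFirstandLast (elements : List String) : List String :=
  (PySem.List.pyRange 0 ((elements.length : Int)) 1).foldl
    (fun final i =>
      if PySem.List.pyGetD elements i "" ∉ punctation then
        if 3 ≤ PySem.Str.len (PySem.List.pyGetD elements i "") then
          final ++ [String.ofList (recursionA (PySem.List.pyGetD elements i "").toList)]
        else final ++ [PySem.List.pyGetD elements i ""]
      else final ++ [PySem.List.pyGetD elements i ""])
    []

-- ===== PORT B =====
-- the while loop of strip_outer: advance both pointers while outer characters match (case-insensitively)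
def tpScan (cs : List Char) (i j : Nat) : Nat × Nat :=
  if i + 2 ≤ j ∧ PySem.Chars.lowerChar (cs.getD i ' ') = PySem.Chars.lowerChar (cs.getD j ' ') then
    tpScan cs (i + 1) (j - 1)
  else (i, j)
termination_by j - i

def stripOuter (s : String) : String :=
  let cs := s.toList
  let p := tpScan cs 0 (cs.length - 1)
  String.ofList ((cs.drop p.1).take (p.2 + 1 - p.1))

def withoutFirstandLast_alt (elements : List String) : List String :=
  elements.map (fun s => if s ∈ punctation ∨ PySem.Str.len s < 3 then s else stripOuter s)

-- ===== PRECONDITION & SPEC =====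
def Spec_withoutFirstandLast (elements : List String) (out : List String) : Prop := out = withoutFirstandLast_alt elements
instance (elements : List String) (out : List String) : Decidable (Spec_withoutFirstandLast elements out) := by unfold Spec_withoutFirstandLast; infer_instance

-- ===== CLAIM (what is proved, stated in full; the proofs are below) =====
def Claim_equal_withoutFirstandLast : Prop := ∀ (elements : List String), Dom_withoutFirstandLast elements → Spec_withoutFirstandLast elements (withoutFirstandLast elements)

-- ===== LEMMAS AND PROOFS =====

lemma sub_getElem? (cs : List Char) (i j k : Nat) (hk : k < j + 1 - i) :
    ((cs.drop i).take (j + 1 - i))[k]? = cs[i + k]? := by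
  rw [List.getElem?_take_of_lt hk, List.getElem?_drop]

-- the core invariant: recursion on the slice cs[i..j] is the two-pointer scan on (i, j)
lemma rec_eq_tp (n : Nat) : ∀ (cs : List Char) (i j : Nat), j - i ≤ n → i ≤ j → j < cs.length →
    recursionA ((cs.drop i).take (j + 1 - i)) =
      ((cs.drop (tpScan cs i j).1).take ((tpScan cs i j).2 + 1 - (tpScan cs i j).1)) := by
  induction n with
  | zero =>
    intro cs i j hn hij hj
    rw [recursionA, tpScan]
    have hlen : ((cs.drop i).take (j + 1 - i)).length = j + 1 - i := by
      simp; omega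
    rw [if_neg (by simp [hlen]; omega), if_neg (by omega)]
  | succ n ih =>
    intro cs i j hn hij hj
    have hlen : ((cs.drop i).take (j + 1 - i)).length = j + 1 - i := by
      simp; omega
    have hget0 : PySem.List.pyGet? ((cs.drop i).take (j + 1 - i)) 0 = cs[i]? := by
      rw [PySem.List.pyGet?_zero, sub_getElem? cs i j 0 (by omega)]
      simp
    have hgetl : PySem.List.pyGet? ((cs.drop i).take (j + 1 - i)) (-1) = cs[j]? := by
      rw [PySem.List.pyGet?_neg_one, List.getLast?_eq_getElem?, hlen,
        sub_getElem? cs i j (j + 1 - i - 1) (by omega)]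
      congr 1; omega
    have hgi : cs[i]? = some (cs.getD i ' ') := by
      rw [List.getD_eq_getElem _ _ (by omega)]; exact List.getElem?_eq_getElem (by omega)
    have hgj : cs[j]? = some (cs.getD j ' ') := by
      rw [List.getD_eq_getElem _ _ hj]; exact List.getElem?_eq_getElem hj
    rw [recursionA, tpScan, hlen, hget0, hgetl, hgi, hgj]
    by_cases hc : i + 2 ≤ j ∧
        PySem.Chars.lowerChar (cs.getD i ' ') = PySem.Chars.lowerChar (cs.getD j ' ')
    · rw [if_pos hc]
      rw [if_pos ⟨by rw [Option.map_some, Option.map_some, hc.2], by omega⟩]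
      have hslice : PySem.List.slice ((cs.drop i).take (j + 1 - i)) (some 1) (some (-1)) =
          (cs.drop (i + 1)).take ((j - 1) + 1 - (i + 1)) := by
        have hcl : PySem.List.clampIdx (j + 1 - i) 1 = 1 := by
          simp [PySem.List.clampIdx]; omega
        simp only [PySem.List.slice, PySem.List.clampIdx_neg_one, hlen, hcl]
        rw [List.drop_take, List.take_take, List.drop_drop]
        congr 1; omega
      rw [hslice]
      exact ih cs (i + 1) (j - 1) (by omega) (by omega) (by omega)
    · rw [if_neg hc, if_neg ?_]
      intro hAnd
      obtain ⟨h1, h2⟩ := hAnd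
      rw [Option.map_some, Option.map_some] at h1
      exact hc ⟨by omega, Option.some.inj h1⟩

-- per-element agreement
lemma elem_eq (s : String) (final : List String) :
    (if s ∉ punctation then
        if 3 ≤ PySem.Str.len s then final ++ [String.ofList (recursionA s.toList)]
        else final ++ [s]
      else final ++ [s]) =
      final ++ [if s ∈ punctation ∨ PySem.Str.len s < 3 then s else stripOuter s] := by
  by_cases hp : s ∈ punctation
  · simp [hp]
  · by_cases hl : 3 ≤ PySem.Str.len s
    · have hlen : 3 ≤ s.toList.length := by
        have := PySem.Str.len_eq s; omega
      rw [if_pos hp, if_pos hl, if_neg (by rw [not_or]; exact ⟨hp, by omega⟩)]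
      have h0 : (s.toList.drop 0).take (s.toList.length - 1 + 1 - 0) = s.toList := by
        simp; omega
      have := rec_eq_tp (s.toList.length) s.toList 0 (s.toList.length - 1)
        (by omega) (by omega) (by omega)
      rw [h0] at this
      rw [this]
      rfl
    · rw [if_pos hp, if_neg hl, if_pos (Or.inr (by omega))]

-- ===== VERDICT (by name: the statement is the Claim_ definition above) =====
theorem withoutFirstandLast_spec : Claim_equal_withoutFirstandLast := by
  intro elements _
  unfold Spec_withoutFirstandLast withoutFirstandLast withoutFirstandLast_alt
  rw [PySem.List.foldl_pyRange_zero_pyGetD' elements ""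
    (fun final e =>
      if e ∉ punctation then
        if 3 ≤ PySem.Str.len e then final ++ [String.ofList (recursionA e.toList)]
        else final ++ [e]
      else final ++ [e]) []]
  simp only [elem_eq]
  rw [PySem.List.foldl_append_singleton_eq_map]
  rfl
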